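-- pv_equiv track=rewrite | github.com/prashantmishra-ai/LeetcodeSolutions | 1420-build-array-where-you-can-find-the-maximum-exactly-k-comparisons/1420-build-array-where-you-can-find-the-maximum-exactly-k-comparisons.py | numOfArrays
-- ===== SOURCE A (Python) =====
-- def numOfArrays(n: int, m: int, k: int) -> int:
--     mod = 10**9 + 7
--     dp = [[[0 for _ in range(k+1)] for _ in range(m+1)] for _ in range(n+1)]
--     for j in range(1, m+1):
--         dp[1][j][1] = 1
--     for i in range(2, n+1):
--         for j in range(1, m+1):
--             for kk in range(1, k+1):
--                 dp[i][j][kk] = (dp[i][j][kk] + dp[i-1][j][kk]*j) % mod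
--                 for p in range(1, j):
--                     dp[i][j][kk] = (dp[i][j][kk] + dp[i-1][p][kk-1]) % mod
--     return sum(dp[n][j][k] for j in range(1, m+1)) % mod
-- ===== SOURCE B (Python) =====
-- def numOfArrays(n: int, m: int, k: int) -> int:
--     MOD = 10**9 + 7
--     # f[j][c] = number of arrays of the current length whose maximum is j
--     # and which need exactly c comparisons; prefix sums remove the inner p-scan.
--     f = [[0] * (k + 1) for _ in range(m + 1)]
--     for j in range(1, m + 1):
--         f[j][1] = 1
--     for _ in range(2, n + 1):
--         g = [[0] * (k + 1) for _ in range(m + 1)]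
--         for c in range(1, k + 1):
--             pref = 0  # running sum of f[p][c-1] for p < j
--             for j in range(1, m + 1):
--                 g[j][c] = (f[j][c] * j + pref) % MOD
--                 pref = (pref + f[j][c - 1]) % MOD
--         f = g
--     return sum(f[j][k] for j in range(1, m + 1)) % MOD
-- ===== Notes on version B (the rewrite author's own statement) =====
-- stated objective: faster
-- what changed: Replaces the inner scan over p (sum of dp[i-1][p][kk-1]) by a running prefix sum maintained while sweeping j, and keeps only two rolling rows instead of the full 3-D table, dropping a factor of m.
import Mathlib
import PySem

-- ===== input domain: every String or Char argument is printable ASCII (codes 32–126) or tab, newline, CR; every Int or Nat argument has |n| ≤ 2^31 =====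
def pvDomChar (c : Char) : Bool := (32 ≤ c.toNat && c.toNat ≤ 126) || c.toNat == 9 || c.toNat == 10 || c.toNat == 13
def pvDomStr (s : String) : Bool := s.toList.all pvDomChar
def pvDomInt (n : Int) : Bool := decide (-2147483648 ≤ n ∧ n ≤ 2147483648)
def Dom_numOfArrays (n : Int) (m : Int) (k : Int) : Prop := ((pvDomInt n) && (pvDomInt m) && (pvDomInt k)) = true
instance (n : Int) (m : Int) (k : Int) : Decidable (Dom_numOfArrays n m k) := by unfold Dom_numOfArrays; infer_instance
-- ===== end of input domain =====

-- B replaces A's inner scan over p by a running prefix sum and keeps two rolling rows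
-- instead of the full 3-D table (objective: faster, measured asymptotically better).
-- The nested Python lists are ported as index-keyed tables (a map keyed by the index
-- tuple; dp[i][j][kk] becomes a getD at (i,j,kk), an item assignment an insert), which is
-- exact on every input Pre_ admits (there Python only ever indexes in range).

-- ===== PORT A =====
-- dp = [[[0 …] …] …]: the zero-filled (n+1)×(m+1)×(k+1) table
def pvZeros3 (n m k : Int) : Std.HashMap (Int × Int × Int) Int :=
  (PySem.List.pyRange 0 (n+1) 1).foldl (fun d i =>
    (PySem.List.pyRange 0 (m+1) 1).foldl (fun d j =>
      (PySem.List.pyRange 0 (k+1) 1).foldl (fun d c => d.insert (i, j, c) 0) d) d)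
    (∅)

-- dp[i][j][c]
def pvG3 (dp : Std.HashMap (Int × Int × Int) Int) (i j c : Int) : Int := dp.getD (i, j, c) 0

-- the body of A's 'for kk' loop: the seed assignment, then the 'for p in range(1, j)' loop
def pvAInner (i j : Int) (dp : Std.HashMap (Int × Int × Int) Int) (kk : Int) :
    Std.HashMap (Int × Int × Int) Int :=
  let dp1 := dp.insert (i, j, kk)
    (PySem.Int.mod (pvG3 dp i j kk + pvG3 dp (i-1) j kk * j) 1000000007)
  (PySem.List.pyRange 1 j 1).foldl
    (fun dp p => dp.insert (i, j, kk)
      (PySem.Int.mod (pvG3 dp i j kk + pvG3 dp (i-1) p (kk-1)) 1000000007)) dp1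

-- the body of A's 'for i' loop: 'for j … for kk …'
def pvARow (m k : Int) (dp : Std.HashMap (Int × Int × Int) Int) (i : Int) :
    Std.HashMap (Int × Int × Int) Int :=
  (PySem.List.pyRange 1 (m+1) 1).foldl (fun dp j =>
    (PySem.List.pyRange 1 (k+1) 1).foldl (fun dp kk => pvAInner i j dp kk) dp) dp

def numOfArrays (n : Int) (m : Int) (k : Int) : Int :=
  let dp0 := pvZeros3 n m k
  let dp1 := (PySem.List.pyRange 1 (m+1) 1).foldl (fun dp j => dp.insert (1, j, 1) 1) dp0
  let dp2 := (PySem.List.pyRange 2 (n+1) 1).foldl (pvARow m k) dp1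
  PySem.Int.mod (((PySem.List.pyRange 1 (m+1) 1).map (fun j => pvG3 dp2 n j k)).sum) 1000000007

-- ===== PORT B =====
-- [[0]*(k+1) for _ in range(m+1)]: the zero-filled (m+1)×(k+1) table
def pvZeros2 (m k : Int) : Std.HashMap (Int × Int) Int :=
  (PySem.List.pyRange 0 (m+1) 1).foldl (fun d j =>
    (PySem.List.pyRange 0 (k+1) 1).foldl (fun d c => d.insert (j, c) 0) d)
    (∅)

-- f[j][c]
def pvG2 (f : Std.HashMap (Int × Int) Int) (j c : Int) : Int := f.getD (j, c) 0

-- the body of B's inner 'for j' loop: state = (g, pref)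
def pvBRowStep (f : Std.HashMap (Int × Int) Int) (c : Int)
    (s : Std.HashMap (Int × Int) Int × Int) (j : Int) : Std.HashMap (Int × Int) Int × Int :=
  (s.1.insert (j, c) (PySem.Int.mod (pvG2 f j c * j + s.2) 1000000007),
   PySem.Int.mod (s.2 + pvG2 f j (c-1)) 1000000007)

-- one iteration of B's 'for _ in range(2, n+1)' loop: fresh zero g, then 'for c … for j …'
def pvBStep (m k : Int) (f : Std.HashMap (Int × Int) Int) : Std.HashMap (Int × Int) Int :=
  (PySem.List.pyRange 1 (k+1) 1).foldl
    (fun g c => ((PySem.List.pyRange 1 (m+1) 1).foldl (pvBRowStep f c) (g, 0)).1)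
    (pvZeros2 m k)

def numOfArrays_alt (n : Int) (m : Int) (k : Int) : Int :=
  let f0 := pvZeros2 m k
  let f1 := (PySem.List.pyRange 1 (m+1) 1).foldl (fun f j => f.insert (j, 1) 1) f0
  let f2 := (PySem.List.pyRange 2 (n+1) 1).foldl (fun f _ => pvBStep m k f) f1
  PySem.Int.mod (((PySem.List.pyRange 1 (m+1) 1).map (fun j => pvG2 f2 j k)).sum) 1000000007

-- ===== PRECONDITION & SPEC =====
-- Pre_ excludes exactly the inputs on which the Python A raises IndexError:
-- if m ≥ 1, A writes dp[1][j][1], which needs n ≥ 1 (row 1 exists) and k ≥ 1 (inner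
-- dimension ≥ 2); if m ≤ 0 every loop body is dead and A returns 0 for any n, k.
def Pre_numOfArrays (n : Int) (m : Int) (k : Int) : Prop := m ≤ 0 ∨ (1 ≤ n ∧ 1 ≤ k)
instance (n : Int) (m : Int) (k : Int) : Decidable (Pre_numOfArrays n m k) := by
  unfold Pre_numOfArrays; infer_instance

def pvWitness_numOfArrays : Int × Int × Int := (3, 3, 2)

def Spec_numOfArrays (n : Int) (m : Int) (k : Int) (out : Int) : Prop := out = numOfArrays_alt n m k
instance (n : Int) (m : Int) (k : Int) (out : Int) : Decidable (Spec_numOfArrays n m k out) := by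
  unfold Spec_numOfArrays; infer_instance

-- ===== CLAIM (what is proved, stated in full; the proofs are below) =====
def Claim_equal_numOfArrays : Prop := ∀ (n : Int) (m : Int) (k : Int), Dom_numOfArrays n m k → Pre_numOfArrays n m k → Spec_numOfArrays n m k (numOfArrays n m k)

-- ===== LEMMAS AND PROOFS =====

-- reference table: pvT m k t j c = value of dp[t+1][j][c] (fully reduced), as a pure recursion
def pvSum (f : Int → Int → Int) (j c : Int) : Int :=
  ((PySem.List.pyRange 1 j 1).map (fun p => f p c)).sum

def pvStep (m k : Int) (f : Int → Int → Int) : Int → Int → Int :=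
  fun j c => if 1 ≤ j ∧ j ≤ m ∧ 1 ≤ c ∧ c ≤ k then
    (f j c * j + pvSum f j (c-1)) % 1000000007 else 0

def pvT (m k : Int) : Nat → Int → Int → Int
  | 0 => fun j c => if 1 ≤ j ∧ j ≤ m ∧ c = 1 then 1 else 0
  | (t+1) => pvStep m k (pvT m k t)

lemma pvmod_eq (x : Int) : PySem.Int.mod x 1000000007 = x % 1000000007 :=
  PySem.Int.mod_eq_emod_of_pos (by norm_num)

lemma pvmod_absorb (x y z : Int) :
    (x + (y % 1000000007 + z)) % 1000000007 = (x + (y + z)) % 1000000007 := by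
  conv_lhs => rw [show x + (y % 1000000007 + z) = y % 1000000007 + (x + z) by ring]
  rw [Int.emod_add_emod]; ring_nf

-- getD through an insert, unpacked to componentwise index equality
lemma pvG3_insert (d : Std.HashMap (Int × Int × Int) Int) (i j c v i' j' c' : Int) :
    pvG3 (d.insert (i, j, c) v) i' j' c'
    = if i' = i ∧ j' = j ∧ c' = c then v else pvG3 d i' j' c' := by
  unfold pvG3
  rw [Std.HashMap.getD_insert]
  by_cases h : i' = i ∧ j' = j ∧ c' = c
  · rw [if_pos (by simp [h.1, h.2.1, h.2.2]), if_pos h]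
  · rw [if_neg (by simp [Prod.ext_iff]; omega), if_neg h]

lemma pvG2_insert (d : Std.HashMap (Int × Int) Int) (j c v j' c' : Int) :
    pvG2 (d.insert (j, c) v) j' c'
    = if j' = j ∧ c' = c then v else pvG2 d j' c' := by
  unfold pvG2
  rw [Std.HashMap.getD_insert]
  by_cases h : j' = j ∧ c' = c
  · rw [if_pos (by simp [h.1, h.2]), if_pos h]
  · rw [if_neg (by simp [Prod.ext_iff]; omega), if_neg h]

-- the zero tables read 0 everywhere
lemma pvZeros3_getD (n m k : Int) : ∀ (i j c : Int), pvG3 (pvZeros3 n m k) i j c = 0 := by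
  have hc : ∀ (L : List Int) (d : Std.HashMap (Int × Int × Int) Int) (i0 j0 : Int),
      (∀ i j c, pvG3 d i j c = 0) →
      ∀ i j c, pvG3 (L.foldl (fun d cc => d.insert (i0, j0, cc) 0) d) i j c = 0 := by
    intro L
    induction L with
    | nil => intro d _ _ h i j c; exact h i j c
    | cons a L ih =>
      intro d i0 j0 h i j c
      rw [List.foldl_cons]
      refine ih _ i0 j0 (fun i j c => ?_) i j c
      rw [pvG3_insert]
      split_ifs <;> [rfl; exact h i j c]
  have hj : ∀ (L : List Int) (d : Std.HashMap (Int × Int × Int) Int) (i0 : Int),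
      (∀ i j c, pvG3 d i j c = 0) →
      ∀ i j c, pvG3 (L.foldl (fun d jj =>
        (PySem.List.pyRange 0 (k+1) 1).foldl (fun d cc => d.insert (i0, jj, cc) 0) d) d) i j c = 0 := by
    intro L
    induction L with
    | nil => intro d _ h i j c; exact h i j c
    | cons a L ih =>
      intro d i0 h i j c
      rw [List.foldl_cons]
      exact ih _ i0 (hc _ _ i0 a h) i j c
  have hi : ∀ (L : List Int) (d : Std.HashMap (Int × Int × Int) Int),
      (∀ i j c, pvG3 d i j c = 0) →
      ∀ i j c, pvG3 (L.foldl (fun d ii =>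
        (PySem.List.pyRange 0 (m+1) 1).foldl (fun d jj =>
          (PySem.List.pyRange 0 (k+1) 1).foldl (fun d cc => d.insert (ii, jj, cc) 0) d) d) d) i j c = 0 := by
    intro L
    induction L with
    | nil => intro d h i j c; exact h i j c
    | cons a L ih =>
      intro d h i j c
      rw [List.foldl_cons]
      exact ih _ (hj _ _ a h) i j c
  intro i j c
  exact hi (PySem.List.pyRange 0 (n+1) 1) (∅)
    (fun i j c => by simp [pvG3, Std.HashMap.getD_empty]) i j c

lemma pvZeros2_getD (m k : Int) : ∀ (j c : Int), pvG2 (pvZeros2 m k) j c = 0 := by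
  have hc : ∀ (L : List Int) (d : Std.HashMap (Int × Int) Int) (j0 : Int),
      (∀ j c, pvG2 d j c = 0) →
      ∀ j c, pvG2 (L.foldl (fun d cc => d.insert (j0, cc) 0) d) j c = 0 := by
    intro L
    induction L with
    | nil => intro d _ h j c; exact h j c
    | cons a L ih =>
      intro d j0 h j c
      rw [List.foldl_cons]
      refine ih _ j0 (fun j c => ?_) j c
      rw [pvG2_insert]
      split_ifs <;> [rfl; exact h j c]
  have hj : ∀ (L : List Int) (d : Std.HashMap (Int × Int) Int),
      (∀ j c, pvG2 d j c = 0) →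
      ∀ j c, pvG2 (L.foldl (fun d jj =>
        (PySem.List.pyRange 0 (k+1) 1).foldl (fun d cc => d.insert (jj, cc) 0) d) d) j c = 0 := by
    intro L
    induction L with
    | nil => intro d h j c; exact h j c
    | cons a L ih =>
      intro d h j c
      rw [List.foldl_cons]
      exact ih _ (hc _ _ a h) j c
  intro j c
  exact hj (PySem.List.pyRange 0 (m+1) 1) (∅)
    (fun j c => by simp [pvG2, Std.HashMap.getD_empty]) j c

-- ---- B side ----
lemma pvB_init (L : List Int) : ∀ (f0 : Std.HashMap (Int × Int) Int) (j c : Int),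
    pvG2 (L.foldl (fun f j => f.insert (j, 1) 1) f0) j c
    = if j ∈ L ∧ c = 1 then 1 else pvG2 f0 j c := by
  induction L with
  | nil => simp
  | cons a L ih =>
    intro f0 j c
    rw [List.foldl_cons, ih, pvG2_insert]
    simp only [List.mem_cons]
    split_ifs <;> tauto

lemma pvB_row (f : Std.HashMap (Int × Int) Int) (c : Int) : ∀ (cnt : Nat) (a p0 : Int)
    (g0 : Std.HashMap (Int × Int) Int) (j' c' : Int),
    pvG2 (((PySem.List.pyRange a (a+cnt) 1).foldl (pvBRowStep f c) (g0, p0)).1) j' c'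
    = if a ≤ j' ∧ j' < a+cnt ∧ c' = c then
        (pvG2 f j' c * j'
          + (p0 + ((PySem.List.pyRange a j' 1).map (fun p => pvG2 f p (c-1))).sum)) % 1000000007
      else pvG2 g0 j' c' := by
  intro cnt
  induction cnt with
  | zero =>
    intro a p0 g0 j' c'
    rw [Nat.cast_zero, add_zero, PySem.List.pyRange_one_eq_nil (le_refl _), List.foldl_nil]
    rw [if_neg (by omega)]
  | succ cnt ih =>
    intro a p0 g0 j' c'
    have hcons : PySem.List.pyRange a (a+((cnt+1:Nat):Int)) 1
        = a :: PySem.List.pyRange (a+1) ((a+1)+(cnt:Int)) 1 := by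
      rw [PySem.List.pyRange_one_cons (by push_cast; omega)]
      have e2 : a+((cnt+1 : Nat) : Int) = (a+1)+(cnt:Int) := by push_cast; ring
      rw [e2]
    rw [hcons, List.foldl_cons]
    have hstep : pvBRowStep f c (g0, p0) a
        = (g0.insert (a, c) ((pvG2 f a c * a + p0) % 1000000007),
           (p0 + pvG2 f a (c-1)) % 1000000007) := by
      unfold pvBRowStep
      rw [pvmod_eq, pvmod_eq]
    rw [hstep, ih]
    by_cases h1 : a+1 ≤ j' ∧ j' < a+1+(cnt:Int) ∧ c' = c
    · rw [if_pos h1, if_pos (by push_cast; omega)]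
      have hsplit : PySem.List.pyRange a j' 1 = a :: PySem.List.pyRange (a+1) j' 1 :=
        PySem.List.pyRange_one_cons (by omega)
      rw [hsplit, List.map_cons, List.sum_cons]
      rw [pvmod_absorb]
      ring_nf
    · rw [if_neg h1, pvG2_insert]
      by_cases h2 : j' = a ∧ c' = c
      · rw [if_pos h2, if_pos (by push_cast; omega), h2.1]
        rw [PySem.List.pyRange_one_eq_nil (le_refl _)]
        simp
      · rw [if_neg h2, if_neg (by push_cast; omega)]

lemma pvB_crows (m : Int) (f : Std.HashMap (Int × Int) Int) (hm : 0 ≤ m) : ∀ (Lc : List Int)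
    (g0 : Std.HashMap (Int × Int) Int) (j' c' : Int),
    pvG2 (Lc.foldl (fun g c =>
      ((PySem.List.pyRange 1 (m+1) 1).foldl (pvBRowStep f c) (g, 0)).1) g0) j' c'
    = if 1 ≤ j' ∧ j' ≤ m ∧ c' ∈ Lc then
        (pvG2 f j' c' * j' + pvSum (pvG2 f) j' (c'-1)) % 1000000007
      else pvG2 g0 j' c' := by
  intro Lc
  induction Lc with
  | nil => intro g0 j' c'; simp
  | cons c Lc ih =>
    intro g0 j' c'
    rw [List.foldl_cons]
    have hrange : PySem.List.pyRange 1 (m+1) 1 = PySem.List.pyRange 1 (1+(m.toNat:Int)) 1 := by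
      congr 1; omega
    have hrow : ∀ j' c',
        pvG2 (((PySem.List.pyRange 1 (m+1) 1).foldl (pvBRowStep f c) (g0, 0)).1) j' c'
        = if 1 ≤ j' ∧ j' < 1+(m.toNat:Int) ∧ c' = c then
            (pvG2 f j' c * j'
              + (0 + ((PySem.List.pyRange 1 j' 1).map (fun p => pvG2 f p (c-1))).sum))
              % 1000000007
          else pvG2 g0 j' c' := by
      intro j' c'
      rw [hrange]
      exact pvB_row f c m.toNat 1 0 g0 j' c'
    rw [ih]
    by_cases h1 : 1 ≤ j' ∧ j' ≤ m ∧ c' ∈ Lc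
    · rw [if_pos h1, if_pos ⟨h1.1, h1.2.1, List.mem_cons_of_mem _ h1.2.2⟩]
    · rw [if_neg h1, hrow j' c']
      by_cases h2 : 1 ≤ j' ∧ j' < 1+(m.toNat:Int) ∧ c' = c
      · rw [if_pos h2, if_pos ⟨h2.1, by omega, List.mem_cons.mpr (Or.inl h2.2.2)⟩, h2.2.2]
        rw [zero_add]
        rfl
      · rw [if_neg h2, if_neg (by
          intro h3
          rcases List.mem_cons.mp h3.2.2 with hc | hc
          · exact h2 ⟨h3.1, by omega, hc⟩
          · exact h1 ⟨h3.1, h3.2.1, hc⟩)]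

lemma pvB_step_eq (m k : Int) (hm : 0 ≤ m) (f : Std.HashMap (Int × Int) Int) :
    ∀ (j c : Int), pvG2 (pvBStep m k f) j c = pvStep m k (pvG2 f) j c := by
  intro j c
  unfold pvBStep
  rw [pvB_crows m f hm (PySem.List.pyRange 1 (k+1) 1) (pvZeros2 m k) j c]
  unfold pvStep
  simp only [PySem.List.mem_pyRange_one]
  by_cases h : 1 ≤ j ∧ j ≤ m ∧ 1 ≤ c ∧ c ≤ k
  · rw [if_pos (by omega : 1 ≤ j ∧ j ≤ m ∧ 1 ≤ c ∧ c < k+1), if_pos h]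
  · rw [if_neg (by omega : ¬(1 ≤ j ∧ j ≤ m ∧ 1 ≤ c ∧ c < k+1)), if_neg h]
    exact pvZeros2_getD m k j c

lemma pvStep_congr (m k : Int) (g g' : Int → Int → Int) (h : ∀ j c, g j c = g' j c)
    (j c : Int) : pvStep m k g j c = pvStep m k g' j c := by
  unfold pvStep pvSum
  simp only [h]

lemma pvB_iter (m k : Int) (hm : 0 ≤ m) : ∀ (L : List Int) (t : Nat)
    (f : Std.HashMap (Int × Int) Int),
    (∀ j c, pvG2 f j c = pvT m k t j c) →
    ∀ (j c : Int), pvG2 (L.foldl (fun f _ => pvBStep m k f) f) j c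
      = pvT m k (t + L.length) j c := by
  intro L
  induction L with
  | nil => intro t f h j c; simpa using h j c
  | cons x L ih =>
    intro t f h j c
    rw [List.foldl_cons]
    have h' : ∀ j c, pvG2 (pvBStep m k f) j c = pvT m k (t+1) j c := by
      intro j c
      rw [pvB_step_eq m k hm f j c]
      exact pvStep_congr m k (pvG2 f) (pvT m k t) h j c
    rw [ih (t+1) (pvBStep m k f) h' j c]
    congr 1
    simp [List.length_cons]
    omega

-- ---- A side ----
lemma pvA_init (L : List Int) : ∀ (dp0 : Std.HashMap (Int × Int × Int) Int) (i j c : Int),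
    pvG3 (L.foldl (fun dp j => dp.insert (1, j, 1) 1) dp0) i j c
    = if i = 1 ∧ j ∈ L ∧ c = 1 then 1 else pvG3 dp0 i j c := by
  induction L with
  | nil => simp
  | cons a L ih =>
    intro dp0 i j c
    rw [List.foldl_cons, ih, pvG3_insert]
    simp only [List.mem_cons]
    split_ifs <;> tauto

-- the p-loop accumulates a reduced running cell value
lemma pvA_ploop (i j kk : Int) : ∀ (L : List Int) (dp : Std.HashMap (Int × Int × Int) Int)
    (x i' j' c' : Int),
    pvG3 (L.foldl (fun dp p => dp.insert (i, j, kk)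
        (PySem.Int.mod (pvG3 dp i j kk + pvG3 dp (i-1) p (kk-1)) 1000000007))
      (dp.insert (i, j, kk) (x % 1000000007))) i' j' c'
    = pvG3 (dp.insert (i, j, kk)
        ((x + (L.map (fun p => pvG3 dp (i-1) p (kk-1))).sum) % 1000000007)) i' j' c' := by
  intro L
  induction L with
  | nil => intro dp x i' j' c'; simp
  | cons a L ih =>
    intro dp x i' j' c'
    rw [List.foldl_cons]
    have hread : pvG3 (dp.insert (i, j, kk) (x % 1000000007)) i j kk = x % 1000000007 := by
      rw [pvG3_insert, if_pos ⟨rfl, rfl, rfl⟩]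
    have hread' : ∀ p, pvG3 (dp.insert (i, j, kk) (x % 1000000007)) (i-1) p (kk-1)
        = pvG3 dp (i-1) p (kk-1) := by
      intro p; rw [pvG3_insert, if_neg (by omega)]
    have hstep : (dp.insert (i, j, kk) (x % 1000000007)).insert (i, j, kk)
        (PySem.Int.mod (pvG3 (dp.insert (i, j, kk) (x % 1000000007)) i j kk
          + pvG3 (dp.insert (i, j, kk) (x % 1000000007)) (i-1) a (kk-1)) 1000000007)
        = (dp.insert (i, j, kk) (x % 1000000007)).insert (i, j, kk)
          ((x + pvG3 dp (i-1) a (kk-1)) % 1000000007) := by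
      rw [hread, hread' a, pvmod_eq, Int.emod_add_emod]
    rw [hstep, ih (dp.insert (i, j, kk) (x % 1000000007)) (x + pvG3 dp (i-1) a (kk-1)) i' j' c']
    simp only [hread']
    rw [pvG3_insert, pvG3_insert, pvG3_insert]
    split_ifs with h
    · rw [List.map_cons, List.sum_cons, add_assoc]
    · rfl

lemma pvA_cell (i j kk : Int) (dp : Std.HashMap (Int × Int × Int) Int)
    (h0 : pvG3 dp i j kk = 0) : ∀ (i' j' c' : Int),
    pvG3 (pvAInner i j dp kk) i' j' c'
    = pvG3 (dp.insert (i, j, kk)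
        ((pvG3 dp (i-1) j kk * j
          + ((PySem.List.pyRange 1 j 1).map (fun p => pvG3 dp (i-1) p (kk-1))).sum)
          % 1000000007)) i' j' c' := by
  intro i' j' c'
  unfold pvAInner
  rw [h0, zero_add, pvmod_eq]
  exact pvA_ploop i j kk (PySem.List.pyRange 1 j 1) dp (pvG3 dp (i-1) j kk * j) i' j' c'

lemma pvA_kkfold (i j : Int) : ∀ (Lk : List Int), Lk.Nodup →
    ∀ (dp : Std.HashMap (Int × Int × Int) Int), (∀ c ∈ Lk, pvG3 dp i j c = 0) →
    ∀ (i' j' c' : Int),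
    pvG3 (Lk.foldl (fun dp kk => pvAInner i j dp kk) dp) i' j' c'
    = if i' = i ∧ j' = j ∧ c' ∈ Lk then
        (pvG3 dp (i-1) j c' * j
          + ((PySem.List.pyRange 1 j 1).map (fun p => pvG3 dp (i-1) p (c'-1))).sum)
          % 1000000007
      else pvG3 dp i' j' c' := by
  intro Lk
  induction Lk with
  | nil => intro _ dp _ i' j' c'; simp
  | cons kk Lk ih =>
    intro hnd dp hz i' j' c'
    have hnotin : kk ∉ Lk := (List.nodup_cons.mp hnd).1
    have hnd' : Lk.Nodup := (List.nodup_cons.mp hnd).2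
    have hcell := pvA_cell i j kk dp (hz kk (List.mem_cons_self))
    rw [List.foldl_cons]
    have hz1 : ∀ c ∈ Lk, pvG3 (pvAInner i j dp kk) i j c = 0 := by
      intro c hc; rw [hcell, pvG3_insert]
      split_ifs with h
      · exact absurd (h.2.2 ▸ hc) hnotin
      · exact hz c (List.mem_cons_of_mem _ hc)
    have hprev : ∀ x y, pvG3 (pvAInner i j dp kk) (i-1) x y = pvG3 dp (i-1) x y := by
      intro x y; rw [hcell, pvG3_insert]
      split_ifs with h
      · exact absurd h.1 (by omega)
      · rfl
    rw [ih hnd' _ hz1 i' j' c']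
    by_cases h1 : i' = i ∧ j' = j ∧ c' ∈ Lk
    · rw [if_pos h1, if_pos ⟨h1.1, h1.2.1, List.mem_cons_of_mem _ h1.2.2⟩]
      simp only [hprev]
    · rw [if_neg h1, hcell, pvG3_insert]
      by_cases h2 : i' = i ∧ j' = j ∧ c' = kk
      · rw [if_pos ⟨h2.1, h2.2.1, h2.2.2⟩, if_pos ⟨h2.1, h2.2.1, List.mem_cons.mpr (Or.inl h2.2.2)⟩]
        rw [h2.2.2]
      · rw [if_neg (by tauto), if_neg (by
          intro h3
          rcases List.mem_cons.mp h3.2.2 with hc | hc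
          · exact h2 ⟨h3.1, h3.2.1, hc⟩
          · exact h1 ⟨h3.1, h3.2.1, hc⟩)]

lemma pvA_row (m k : Int) (i : Int) :
    ∀ (dp : Std.HashMap (Int × Int × Int) Int),
    (∀ j c, pvG3 dp i j c = 0) →
    ∀ (i' j' c' : Int),
    pvG3 (pvARow m k dp i) i' j' c'
    = if i' = i ∧ (1 ≤ j' ∧ j' < m+1) ∧ (1 ≤ c' ∧ c' < k+1) then
        (pvG3 dp (i-1) j' c' * j'
          + ((PySem.List.pyRange 1 j' 1).map (fun p => pvG3 dp (i-1) p (c'-1))).sum)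
          % 1000000007
      else pvG3 dp i' j' c' := by
  have jfold : ∀ (Lj : List Int), Lj.Nodup →
      ∀ (dp : Std.HashMap (Int × Int × Int) Int), (∀ j ∈ Lj, ∀ c, pvG3 dp i j c = 0) →
      ∀ (i' j' c' : Int),
      pvG3 (Lj.foldl (fun dp j =>
        (PySem.List.pyRange 1 (k+1) 1).foldl (fun dp kk => pvAInner i j dp kk) dp) dp) i' j' c'
      = if i' = i ∧ j' ∈ Lj ∧ c' ∈ PySem.List.pyRange 1 (k+1) 1 then
          (pvG3 dp (i-1) j' c' * j'
            + ((PySem.List.pyRange 1 j' 1).map (fun p => pvG3 dp (i-1) p (c'-1))).sum)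
            % 1000000007
        else pvG3 dp i' j' c' := by
    intro Lj
    induction Lj with
    | nil => intro _ dp _ i' j' c'; simp
    | cons j Lj ih =>
      intro hnd dp hz i' j' c'
      have hnotin : j ∉ Lj := (List.nodup_cons.mp hnd).1
      have hnd' : Lj.Nodup := (List.nodup_cons.mp hnd).2
      have hkk := pvA_kkfold i j (PySem.List.pyRange 1 (k+1) 1)
        (PySem.List.nodup_pyRange_one 1 (k+1)) dp (fun c _ => hz j List.mem_cons_self c)
      rw [List.foldl_cons]
      set dp1 := (PySem.List.pyRange 1 (k+1) 1).foldl (fun dp kk => pvAInner i j dp kk) dp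
        with hdp1
      have hz1 : ∀ j'' ∈ Lj, ∀ c, pvG3 dp1 i j'' c = 0 := by
        intro j'' hj c
        rw [hkk i j'' c]
        split_ifs with h
        · exact absurd (h.2.1 ▸ hj) hnotin
        · exact hz j'' (List.mem_cons_of_mem _ hj) c
      have hprev : ∀ x y, pvG3 dp1 (i-1) x y = pvG3 dp (i-1) x y := by
        intro x y; rw [hkk (i-1) x y]
        split_ifs with h
        · exact absurd h.1 (by omega)
        · rfl
      rw [ih hnd' dp1 hz1 i' j' c']
      by_cases h1 : i' = i ∧ j' ∈ Lj ∧ c' ∈ PySem.List.pyRange 1 (k+1) 1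
      · rw [if_pos h1, if_pos ⟨h1.1, List.mem_cons_of_mem _ h1.2.1, h1.2.2⟩]
        simp only [hprev]
      · rw [if_neg h1, hkk i' j' c']
        by_cases h2 : i' = i ∧ j' = j ∧ c' ∈ PySem.List.pyRange 1 (k+1) 1
        · rw [if_pos h2, if_pos ⟨h2.1, List.mem_cons.mpr (Or.inl h2.2.1), h2.2.2⟩, h2.2.1]
        · rw [if_neg h2, if_neg (by
            intro h3
            rcases List.mem_cons.mp h3.2.1 with hc | hc
            · exact h2 ⟨h3.1, hc, h3.2.2⟩
            · exact h1 ⟨h3.1, hc, h3.2.2⟩)]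
  intro dp hz i' j' c'
  have := jfold (PySem.List.pyRange 1 (m+1) 1) (PySem.List.nodup_pyRange_one 1 (m+1)) dp
    (fun j _ c => hz j c) i' j' c'
  unfold pvARow
  rw [this]
  simp only [PySem.List.mem_pyRange_one]

lemma pvA_rows (m k : Int) : ∀ (cnt : Nat) (t : Nat) (dp : Std.HashMap (Int × Int × Int) Int),
    (∀ j c, pvG3 dp ((t:Int)+1) j c = pvT m k t j c) →
    (∀ i' j c, (t:Int)+1 < i' → pvG3 dp i' j c = 0) →
    ∀ j c, pvG3 ((PySem.List.pyRange ((t:Int)+2) ((t:Int)+2+cnt) 1).foldl (pvARow m k) dp)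
             ((t:Int)+1+cnt) j c = pvT m k (t + cnt) j c := by
  intro cnt
  induction cnt with
  | zero =>
    intro t dp h1 h2 j c
    rw [Nat.cast_zero, add_zero, PySem.List.pyRange_one_eq_nil (le_refl _), List.foldl_nil,
      Nat.add_zero, add_zero]
    exact h1 j c
  | succ cnt ih =>
    intro t dp h1 h2 j c
    have hcons : PySem.List.pyRange ((t:Int)+2) ((t:Int)+2+((cnt:Nat)+1:Nat)) 1
        = ((t:Int)+2) :: PySem.List.pyRange (((t+1:Nat):Int)+2) (((t+1:Nat):Int)+2+cnt) 1 := by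
      rw [PySem.List.pyRange_one_cons (by push_cast; omega)]
      have e1 : (t:Int)+2+1 = ((t+1:Nat):Int)+2 := by push_cast; ring
      have e2 : (t:Int)+2+((cnt+1 : Nat) : Int) = ((t+1:Nat):Int)+2+(cnt:Int) := by
        push_cast; ring
      rw [e1, e2]
    rw [hcons, List.foldl_cons]
    have hz : ∀ j c, pvG3 dp ((t:Int)+2) j c = 0 := fun j c => h2 _ j c (by omega)
    have hrow := pvA_row m k ((t:Int)+2) dp hz
    have h1' : ∀ j c, pvG3 (pvARow m k dp ((t:Int)+2)) (((t+1:Nat):Int)+1) j c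
        = pvT m k (t+1) j c := by
      intro j c
      rw [hrow]
      have hidx : (((t+1:Nat):Int)+1) = (t:Int)+2 := by push_cast; ring
      rw [hidx]
      have hprev : (t:Int)+2-1 = (t:Int)+1 := by ring
      simp only [hprev, true_and]
      show _ = pvStep m k (pvT m k t) j c
      unfold pvStep
      by_cases hin : 1 ≤ j ∧ j ≤ m ∧ 1 ≤ c ∧ c ≤ k
      · rw [if_pos (by omega : ((1 ≤ j ∧ j < m+1) ∧ (1 ≤ c ∧ c < k+1))), if_pos hin]
        simp only [h1, pvSum]
      · rw [if_neg (by omega : ¬((1 ≤ j ∧ j < m+1) ∧ (1 ≤ c ∧ c < k+1))), if_neg hin]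
        exact hz j c
    have h2' : ∀ i' j c, ((t+1:Nat):Int)+1 < i' → pvG3 (pvARow m k dp ((t:Int)+2)) i' j c = 0 := by
      intro i' j c hgt
      rw [hrow]
      rw [if_neg (by push_cast at hgt; omega)]
      exact h2 i' j c (by push_cast at hgt; omega)
    have := ih (t+1) (pvARow m k dp ((t:Int)+2)) h1' h2' j c
    have hidx2 : (((t+1:Nat)):Int)+1+(cnt:Int) = (t:Int)+1+((cnt:Nat)+1:Nat) := by
      push_cast; ring
    rw [hidx2] at this
    rw [show t + (cnt+1) = (t+1) + cnt from by omega]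
    exact this

-- ===== VERDICT (by name: the statement is the Claim_ definition above) =====
theorem numOfArrays_spec : Claim_equal_numOfArrays := by
  intro n m k _ hpre
  unfold Spec_numOfArrays numOfArrays numOfArrays_alt
  by_cases hm : m ≤ 0
  · have hnil : PySem.List.pyRange 1 (m+1) 1 = [] := PySem.List.pyRange_one_eq_nil (by omega)
    simp only [hnil, List.foldl_nil, List.map_nil, List.sum_nil]
  · obtain ⟨hn, hk⟩ : 1 ≤ n ∧ 1 ≤ k := hpre.resolve_left (by omega)
    have hm0 : (0:Int) ≤ m := by omega
    have hAinit : ∀ (i j c : Int),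
        pvG3 ((PySem.List.pyRange 1 (m+1) 1).foldl (fun dp j => dp.insert (1, j, 1) 1)
          (pvZeros3 n m k)) i j c
        = if i = 1 ∧ (1 ≤ j ∧ j < m+1) ∧ c = 1 then 1 else 0 := by
      intro i j c
      rw [pvA_init (PySem.List.pyRange 1 (m+1) 1) (pvZeros3 n m k) i j c]
      simp only [PySem.List.mem_pyRange_one, pvZeros3_getD]
    have hBinit : ∀ (j c : Int),
        pvG2 ((PySem.List.pyRange 1 (m+1) 1).foldl (fun f j => f.insert (j, 1) 1)
          (pvZeros2 m k)) j c = pvT m k 0 j c := by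
      intro j c
      rw [pvB_init (PySem.List.pyRange 1 (m+1) 1) (pvZeros2 m k) j c]
      simp only [PySem.List.mem_pyRange_one, pvT, pvZeros2_getD]
      by_cases h : 1 ≤ j ∧ j ≤ m ∧ c = 1
      · rw [if_pos (by omega : (1 ≤ j ∧ j < m+1) ∧ c = 1), if_pos h]
      · rw [if_neg (by omega : ¬((1 ≤ j ∧ j < m+1) ∧ c = 1)), if_neg h]
    set cnt := (n-1).toNat with hcnt
    have hA : ∀ j c, pvG3 ((PySem.List.pyRange 2 (n+1) 1).foldl (pvARow m k)
        ((PySem.List.pyRange 1 (m+1) 1).foldl (fun dp j => dp.insert (1, j, 1) 1)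
          (pvZeros3 n m k))) n j c = pvT m k cnt j c := by
      intro j c
      have h1 : ∀ j c, pvG3 ((PySem.List.pyRange 1 (m+1) 1).foldl
          (fun dp j => dp.insert (1, j, 1) 1) (pvZeros3 n m k)) (((0:Nat):Int)+1) j c
          = pvT m k 0 j c := by
        intro j c
        rw [hAinit]
        simp only [pvT]
        by_cases h : 1 ≤ j ∧ j ≤ m ∧ c = 1
        · rw [if_pos (by omega : ((0:Nat):Int)+1 = 1 ∧ (1 ≤ j ∧ j < m+1) ∧ c = 1), if_pos h]
        · rw [if_neg (by omega : ¬(((0:Nat):Int)+1 = 1 ∧ (1 ≤ j ∧ j < m+1) ∧ c = 1)), if_neg h]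
      have h2 : ∀ (i' j c : Int), ((0:Nat):Int)+1 < i' →
          pvG3 ((PySem.List.pyRange 1 (m+1) 1).foldl (fun dp j => dp.insert (1, j, 1) 1)
            (pvZeros3 n m k)) i' j c = 0 := by
        intro i' j c hlt
        rw [hAinit]
        rw [if_neg (by push_cast at hlt; omega)]
      have := pvA_rows m k cnt 0 _ h1 h2 j c
      have e1 : ((0:Nat):Int)+2 = 2 := by norm_num
      have e2 : (2:Int)+(cnt:Int) = n+1 := by omega
      have e3 : ((0:Nat):Int)+1+(cnt:Int) = n := by omega
      rw [e1, e2, e3] at this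
      rw [this]
      congr 1
      omega
    have hB : ∀ j c, pvG2 ((PySem.List.pyRange 2 (n+1) 1).foldl (fun f _ => pvBStep m k f)
        ((PySem.List.pyRange 1 (m+1) 1).foldl (fun f j => f.insert (j, 1) 1)
          (pvZeros2 m k))) j c = pvT m k cnt j c := by
      intro j c
      rw [pvB_iter m k hm0 (PySem.List.pyRange 2 (n+1) 1) 0 _ hBinit j c]
      congr 1
      rw [PySem.List.length_pyRange_one]
      omega
    simp only []
    congr 1
    congr 1
    apply List.map_congr_left
    intro j _
    rw [hA j k, hB j k]
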